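-- pv_equiv track=rewrite | github.com/marshomics/profinder | profinder/igr_extractor.py | _parse_gene_id
-- ===== SOURCE A (Python) =====
-- def _parse_gene_id(attributes: str) -> str:
--     """Extract a gene identifier from GFF attributes.
--
--     Tries, in order: ID=, locus_tag=, gene=, Name= (stripping any
--     trailing ' gene' or ' CDS' suffix from Geneious-style names).
--     """
--     for key in ("ID=", "locus_tag=", "gene=", "Name="):
--         for attr in attributes.split(";"):
--             if attr.startswith(key):
--                 val = attr[len(key):]
--                 for suffix in (" gene", " CDS"):
--                     if val.endswith(suffix):
--                         val = val[:-len(suffix)]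
--                 return val
--     return ""
-- ===== SOURCE B (Python) =====
-- def _parse_gene_id(attributes: str) -> str:
--     # Single pass over the fragments, keeping the match with the best
--     # (lowest) key priority; the first fragment wins on ties.
--     best = None  # (priority, raw value) of the best match seen so far
--     for attr in attributes.split(";"):
--         for priority, key in enumerate(("ID=", "locus_tag=", "gene=", "Name=")):
--             if attr.startswith(key):
--                 if best is None or priority < best[0]:
--                     best = (priority, attr[len(key):])
--                 break
--     if best is None:
--         return ""
--     val = best[1]
--     for suffix in (" gene", " CDS"):
--         if val.endswith(suffix):
--             val = val[:-len(suffix)]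
--     return val
-- ===== Notes on version B (the rewrite author's own statement) =====
-- stated objective: alternative
-- what changed: A loops over the priority keys and rescans the whole fragment list once per key; B makes a single pass over the fragments, keeping the (priority, value) of the best-priority first match in an accumulator.
import Mathlib
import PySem

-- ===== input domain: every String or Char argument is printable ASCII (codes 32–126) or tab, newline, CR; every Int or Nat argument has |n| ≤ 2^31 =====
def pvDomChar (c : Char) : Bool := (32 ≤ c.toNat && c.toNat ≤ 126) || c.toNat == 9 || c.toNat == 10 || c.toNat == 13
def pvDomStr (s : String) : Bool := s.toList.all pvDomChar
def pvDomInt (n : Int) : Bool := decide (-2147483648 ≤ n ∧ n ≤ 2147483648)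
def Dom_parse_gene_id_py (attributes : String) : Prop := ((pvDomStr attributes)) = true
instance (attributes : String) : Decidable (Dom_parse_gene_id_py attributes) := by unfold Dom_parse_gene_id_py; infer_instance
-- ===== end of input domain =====

-- B replaces A's priority-key outer loop (which rescans all fragments once per key)
-- by a single pass over the fragments keeping the best-priority first match (objective: alternative).

-- the four priority keys (shared literals of both Pythons)
def pvKeyID : List Char := "ID=".toList
def pvKeyLT : List Char := "locus_tag=".toList
def pvKeyGene : List Char := "gene=".toList
def pvKeyName : List Char := "Name=".toList

-- ===== PORT A =====
-- shared by both ports: both Pythons strip the suffixes with the same two-step loop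
def pvStrip (val : List Char) : List Char :=
  [" gene".toList, " CDS".toList].foldl
    (fun v suf => if PySem.Chars.endswith v suf then PySem.List.slice v none (some (-(suf.length : Int))) else v) val

-- A's inner loop: first fragment starting with `key`, returning attr[len(key):]
def pvFindA (key : List Char) : List (List Char) → Option (List Char)
  | [] => none
  | a :: rest =>
    if PySem.Chars.startswith a key then some (PySem.List.slice a (some (key.length : Int)) none)
    else pvFindA key rest

-- A's outer loop over the priority keys
def pvKeysLoopA (frags : List (List Char)) : List (List Char) → List Char
  | [] => []
  | k :: ks => match pvFindA k frags with
    | some v => pvStrip v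
    | none => pvKeysLoopA frags ks

def parse_gene_id_py (attributes : String) : String :=
  String.ofList (pvKeysLoopA (PySem.Chars.splitOn attributes.toList [';'])
    [pvKeyID, pvKeyLT, pvKeyGene, pvKeyName])

-- ===== PORT B =====
def pvKeysB : List (Nat × List Char) := [(0, pvKeyID), (1, pvKeyLT), (2, pvKeyGene), (3, pvKeyName)]

-- B's inner loop: first (priority, key) that `attr` starts with, with attr[len(key):]
def pvMatchKey (attr : List Char) : List (Nat × List Char) → Option (Nat × List Char)
  | [] => none
  | (p, k) :: ks =>
    if PySem.Chars.startswith attr k then some (p, PySem.List.slice attr (some (k.length : Int)) none)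
    else pvMatchKey attr ks

-- B's accumulator update: record the match if strictly better than the best so far
def pvUpdate (best : Option (Nat × List Char)) (attr : List Char) : Option (Nat × List Char) :=
  match pvMatchKey attr pvKeysB with
  | none => best
  | some (p, w) =>
    match best with
    | none => some (p, w)
    | some (bp, bv) => if p < bp then some (p, w) else some (bp, bv)

def parse_gene_id_py_alt (attributes : String) : String :=
  match (PySem.Chars.splitOn attributes.toList [';']).foldl pvUpdate none with
  | none => ""
  | some (_, v) => String.ofList (pvStrip v)

-- ===== PRECONDITION & SPEC =====
def Spec_parse_gene_id_py (attributes : String) (out : String) : Prop := out = parse_gene_id_py_alt attributes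
instance (attributes : String) (out : String) : Decidable (Spec_parse_gene_id_py attributes out) := by unfold Spec_parse_gene_id_py; infer_instance

-- ===== CLAIM (what is proved, stated in full; the proofs are below) =====
def Claim_equal_parse_gene_id_py : Prop := ∀ (attributes : String), Dom_parse_gene_id_py attributes → Spec_parse_gene_id_py attributes (parse_gene_id_py attributes)

-- ===== LEMMAS AND PROOFS =====

-- left-biased minimum on priorities
def pvMerge (b c : Option (Nat × List Char)) : Option (Nat × List Char) :=
  match c with
  | none => b
  | some (q, u) =>
    match b with
    | none => some (q, u)
    | some (p, w) => if q < p then some (q, u) else some (p, w)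

lemma pvMerge_none_left (c : Option (Nat × List Char)) : pvMerge none c = c := by
  cases c with
  | none => rfl
  | some qu => cases qu; rfl

lemma pvUpdate_eq_merge (b : Option (Nat × List Char)) (a : List Char) :
    pvUpdate b a = pvMerge b (pvMatchKey a pvKeysB) := by
  unfold pvUpdate pvMerge
  cases pvMatchKey a pvKeysB with
  | none => rfl
  | some pw => cases pw with
    | mk p w => cases b <;> rfl

lemma pvMerge_assoc (a b c : Option (Nat × List Char)) :
    pvMerge (pvMerge a b) c = pvMerge a (pvMerge b c) := by
  rcases c with _ | ⟨r, t⟩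
  · rfl
  rcases b with _ | ⟨q, u⟩
  · rcases a with _ | ⟨p, w⟩ <;> rfl
  rcases a with _ | ⟨p, w⟩
  · by_cases hrq : r < q <;> simp [pvMerge, hrq]
  · by_cases hqp : q < p <;> by_cases hrq : r < q <;> by_cases hrp : r < p <;>
      simp [pvMerge, hqp, hrq, hrp] <;> omega

lemma pvFoldl_merge (frags : List (List Char)) :
    ∀ b, frags.foldl pvUpdate b = pvMerge b (frags.foldl pvUpdate none) := by
  induction frags with
  | nil => intro b; cases b <;> rfl
  | cons f fs ih =>
    intro b
    simp only [List.foldl_cons, pvUpdate_eq_merge]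
    rw [ih (pvMerge b (pvMatchKey f pvKeysB)), ih (pvMerge none (pvMatchKey f pvKeysB))]
    rw [pvMerge_none_left, pvMerge_assoc]

-- A's nested search, with the key's priority attached
def pvAFind (frags : List (List Char)) : List (Nat × List Char) → Option (Nat × List Char)
  | [] => none
  | (p, k) :: ks =>
    match pvFindA k frags with
    | some v => some (p, v)
    | none => pvAFind frags ks

-- no fragment starts with two of the priority keys: none of them is a prefix of another
lemma pv_no_two (f a b : List Char)
    (h1 : PySem.Chars.startswith f a = true) (h2 : PySem.Chars.startswith f b = true)
    (hab : ¬ a <+: b) (hba : ¬ b <+: a) : False := by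
  rw [PySem.Chars.startswith_iff] at h1 h2
  rcases List.prefix_or_prefix_of_prefix h1 h2 with h | h
  · exact hab h
  · exact hba h

lemma pvStep (f : List Char) (frags : List (List Char)) :
    pvAFind (f :: frags) pvKeysB = pvMerge (pvMatchKey f pvKeysB) (pvAFind frags pvKeysB) := by
  by_cases h0 : PySem.Chars.startswith f pvKeyID = true <;>
  by_cases h1 : PySem.Chars.startswith f pvKeyLT = true <;>
  by_cases h2 : PySem.Chars.startswith f pvKeyGene = true <;>
  by_cases h3 : PySem.Chars.startswith f pvKeyName = true
  all_goals first
  | exact (pv_no_two f _ _ h0 h1 (by decide) (by decide)).elim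
  | exact (pv_no_two f _ _ h0 h2 (by decide) (by decide)).elim
  | exact (pv_no_two f _ _ h0 h3 (by decide) (by decide)).elim
  | exact (pv_no_two f _ _ h1 h2 (by decide) (by decide)).elim
  | exact (pv_no_two f _ _ h1 h3 (by decide) (by decide)).elim
  | exact (pv_no_two f _ _ h2 h3 (by decide) (by decide)).elim
  | (cases e0 : pvFindA pvKeyID frags <;>
     cases e1 : pvFindA pvKeyLT frags <;>
     cases e2 : pvFindA pvKeyGene frags <;>
     cases e3 : pvFindA pvKeyName frags <;>
     simp [pvAFind, pvMatchKey, pvMerge, pvKeysB, pvFindA, h0, h1, h2, h3, e0, e1, e2, e3])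

lemma pvMain (frags : List (List Char)) :
    frags.foldl pvUpdate none = pvAFind frags pvKeysB := by
  induction frags with
  | nil => rfl
  | cons f fs ih =>
    rw [pvStep]
    simp only [List.foldl_cons, pvUpdate_eq_merge]
    rw [pvFoldl_merge fs (pvMerge none (pvMatchKey f pvKeysB)), pvMerge_none_left, ih]

lemma pvLoopA_eq (frags : List (List Char)) :
    pvKeysLoopA frags [pvKeyID, pvKeyLT, pvKeyGene, pvKeyName] =
      (match pvAFind frags pvKeysB with
       | none => []
       | some (_, v) => pvStrip v) := by
  cases e0 : pvFindA pvKeyID frags <;>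
  cases e1 : pvFindA pvKeyLT frags <;>
  cases e2 : pvFindA pvKeyGene frags <;>
  cases e3 : pvFindA pvKeyName frags <;>
    simp [pvKeysLoopA, pvAFind, pvKeysB, e0, e1, e2, e3]

-- ===== VERDICT (by name: the statement is the Claim_ definition above) =====
theorem parse_gene_id_py_spec : Claim_equal_parse_gene_id_py := by
  intro attributes _
  unfold Spec_parse_gene_id_py parse_gene_id_py parse_gene_id_py_alt
  rw [pvMain, pvLoopA_eq]
  cases pvAFind (PySem.Chars.splitOn attributes.toList [';']) pvKeysB with
  | none => rfl
  | some pv => cases pv; rfl
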